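-- pv_equiv track=rewrite | github.com/anmshen/cnn-weather-forecasting | ablation_parallel.py | assign_groups
-- ===== SOURCE A (Python) =====
-- def assign_groups(names, patterns):
--     groups = {g: [] for g in patterns}
--     groups["other"] = []
--     for ch, name in enumerate(names):
--         assigned = False
--         for group, substrings in patterns.items():
--             if any(s.lower() in name.lower() for s in substrings):
--                 groups[group].append(ch)
--                 assigned = True
--                 break
--         if not assigned:
--             groups["other"].append(ch)
--     return {g: idxs for g, idxs in groups.items() if idxs}
-- ===== SOURCE B (Python) =====
-- def assign_groups(names, patterns):
--     # (index, lowercased name) pairs still unclaimed by any group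
--     remaining = list(enumerate(name.lower() for name in names))
--     result = {}
--     for group, substrings in patterns.items():
--         subs = [s.lower() for s in substrings]
--         taken = [i for i, low in remaining if any(s in low for s in subs)]
--         if taken:
--             remaining = [(i, low) for i, low in remaining if not any(s in low for s in subs)]
--             result[group] = taken
--     if remaining:
--         result["other"] = [i for i, low in remaining]
--     return result
-- ===== Notes on version B (the rewrite author's own statement) =====
-- stated objective: alternative
-- what changed: B is group-major instead of name-major: it keeps a shrinking list of still-unclaimed (index, lowercased name) pairs and, for each pattern group in order, partitions that list into the group's bucket and the rest, building the result dict directly; A scans all patterns per name into a pre-seeded dict that is filtered at the end.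
-- outside the precondition, e.g. on assign_groups(['x', 'y'], {'other': ['y']}): A returns {'other': [0, 1]}, B returns {'other': [0]}
import Mathlib
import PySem

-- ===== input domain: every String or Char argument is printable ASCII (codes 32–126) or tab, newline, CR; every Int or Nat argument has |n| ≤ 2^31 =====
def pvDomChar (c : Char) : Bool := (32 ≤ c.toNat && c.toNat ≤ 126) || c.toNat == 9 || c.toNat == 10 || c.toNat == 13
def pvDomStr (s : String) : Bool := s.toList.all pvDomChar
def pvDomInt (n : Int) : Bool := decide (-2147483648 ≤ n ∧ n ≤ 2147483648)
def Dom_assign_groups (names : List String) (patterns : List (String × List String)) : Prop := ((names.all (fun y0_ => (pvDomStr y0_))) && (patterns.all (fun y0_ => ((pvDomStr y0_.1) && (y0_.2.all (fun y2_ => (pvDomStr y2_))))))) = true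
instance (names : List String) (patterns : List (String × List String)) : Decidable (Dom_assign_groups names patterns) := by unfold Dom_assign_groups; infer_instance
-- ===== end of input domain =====

-- B is group-major: it partitions a shrinking list of still-unclaimed (index, lowercased name)
-- pairs once per pattern group, instead of A's per-name scan over all patterns into a pre-seeded
-- dict; return value only, neither function mutates its arguments.

-- ===== PORT A =====
-- any(s.lower() in name.lower() for s in substrings)
def pvLowMatch (name : String) (subs : List String) : Bool :=
  subs.any (fun s => PySem.Str.isIn (PySem.Str.lower s) (PySem.Str.lower name))

-- A's inner 'for group, substrings in patterns.items(): … break' with the trailing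
-- 'if not assigned' branch: first matching group gets ch appended, else "other".
-- (groups[group].append(ch) on an existing key = Dict.modify with default [].)
def pvAssignOne (ch : Int) (name : String) :
    List (String × List String) → PySem.Dict String (List Int) → PySem.Dict String (List Int)
  | [], d => d.modify "other" [] (· ++ [ch])
  | q :: rest, d =>
      if pvLowMatch name q.2 then d.modify q.1 [] (· ++ [ch]) else pvAssignOne ch name rest d

def assign_groups (names : List String) (patterns : List (String × List String)) : List (String × List Int) :=
  -- patterns is a Python dict: its iteration order/content is that of the dict the
  -- association list denotes, i.e. (PySem.Dict.ofList patterns).items (exact).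
  let pats := (PySem.Dict.ofList patterns).items
  -- groups = {g: [] for g in patterns}; groups["other"] = []
  let g0 := pats.foldl (fun d q => d.insert q.1 ([] : List Int)) PySem.Dict.empty
  let g1 := g0.insert "other" []
  -- for ch, name in enumerate(names): …
  let g2 := (PySem.List.enumerate names).foldl (fun d p => pvAssignOne p.1 p.2 pats d) g1
  -- {g: idxs for g, idxs in groups.items() if idxs}
  g2.items.filter (fun p => !p.2.isEmpty)

-- ===== PORT B =====
def assign_groups_alt (names : List String) (patterns : List (String × List String)) : List (String × List Int) :=
  -- patterns is a Python dict, normalised exactly as in port A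
  let pats := (PySem.Dict.ofList patterns).items
  -- remaining = list(enumerate(name.lower() for name in names)); result = {}
  let init : List (Int × String) × PySem.Dict String (List Int) :=
    (PySem.List.enumerate (names.map PySem.Str.lower), PySem.Dict.empty)
  -- for group, substrings in patterns.items(): partition `remaining` into taken/kept
  let st := pats.foldl
    (fun (st : List (Int × String) × PySem.Dict String (List Int)) q =>
      let subs := q.2.map PySem.Str.lower
      let taken := (st.1.filter (fun p => subs.any (fun s => PySem.Str.isIn s p.2))).map (·.1)
      if taken.isEmpty then st
      else (st.1.filter (fun p => !subs.any (fun s => PySem.Str.isIn s p.2)),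
            st.2.insert q.1 taken))
    init
  -- if remaining: result["other"] = [i for i, low in remaining]
  (if st.1.isEmpty then st.2 else st.2.insert "other" (st.1.map (·.1))).items

-- ===== PRECONDITION & SPEC =====
-- Pre_ excludes only a key "other" inside patterns: there A merges matched and unmatched
-- indices into one bucket in name order while B's leftover pass overwrites it — an accidental
-- collision with A's sentinel key, a defensible corner either way.
def Pre_assign_groups (names : List String) (patterns : List (String × List String)) : Prop :=
  "other" ∉ patterns.map Prod.fst
instance (names : List String) (patterns : List (String × List String)) : Decidable (Pre_assign_groups names patterns) := by unfold Pre_assign_groups; infer_instance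

def pvWitness_assign_groups : List String × (List (String × List String)) :=
  (["Alpha", "beta"], [("g", ["AL"]), ("h", ["x"])])

def Spec_assign_groups (names : List String) (patterns : List (String × List String)) (out : List (String × List Int)) : Prop := out = assign_groups_alt names patterns
instance (names : List String) (patterns : List (String × List String)) (out : List (String × List Int)) : Decidable (Spec_assign_groups names patterns out) := by unfold Spec_assign_groups; infer_instance

-- ===== CLAIM (what is proved, stated in full; the proofs are below) =====
def Claim_equal_assign_groups : Prop := ∀ (names : List String) (patterns : List (String × List String)), Dom_assign_groups names patterns → Pre_assign_groups names patterns → Spec_assign_groups names patterns (assign_groups names patterns)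

-- ===== LEMMAS AND PROOFS =====

-- The group A's per-name scan sends a name to: first matching pattern key, else "other".
def pvKeyOf (patterns : List (String × List String)) (name : String) : String :=
  ((patterns.find? (fun q => pvLowMatch name q.2)).map Prod.fst).getD "other"

-- The canonical index list of a group.
def pvIdxs (names : List String) (patterns : List (String × List String)) (k : String) : List Int :=
  ((PySem.List.enumerate names).filter (fun p => pvKeyOf patterns p.2 == k)).map Prod.fst

theorem pvAssignOne_eq (ch : Int) (name : String) (patterns : List (String × List String))
    (d : PySem.Dict String (List Int)) :
    pvAssignOne ch name patterns d = d.modify (pvKeyOf patterns name) [] (· ++ [ch]) := by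
  induction patterns with
  | nil => rfl
  | cons q rest ih =>
      by_cases h : pvLowMatch name q.2
      · simp [pvAssignOne, pvKeyOf, h, List.find?]
      · simp only [Bool.not_eq_true] at h
        simp [pvAssignOne, pvKeyOf, h, List.find?, ih]

-- enumerate(xs) of a mapped list
theorem pvEnum_map {A B : Type} (f : A → B) (xs : List A) : ∀ s : Int,
    PySem.List.enumerate (xs.map f) s = (PySem.List.enumerate xs s).map (fun p => (p.1, f p.2)) := by
  induction xs with
  | nil => intro s; rfl
  | cons x t ih => intro s; simp [PySem.List.enumerate_cons, ih]

-- pvKeyOf lands in patterns' keys or at "other"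
theorem pvKeyOf_mem (patterns : List (String × List String)) (nm : String) :
    pvKeyOf patterns nm ∈ patterns.map Prod.fst ++ ["other"] := by
  unfold pvKeyOf
  cases h : patterns.find? (fun q => pvLowMatch nm q.2) with
  | none => simp
  | some m =>
      have hm := List.mem_of_find?_eq_some h
      simp only [Option.map_some, Option.getD_some]
      exact List.mem_append_left _ (List.mem_map_of_mem hm)

theorem pvKeyOf_eq_head (pre rest' : List (String × List String)) (q : String × List String)
    (hnd : (((pre ++ q :: rest').map Prod.fst)).Nodup)
    (hother : "other" ∉ (pre ++ q :: rest').map Prod.fst) (nm : String) :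
    (pvKeyOf (pre ++ q :: rest') nm == q.1)
      = (!pre.any (fun m => pvLowMatch nm m.2) && pvLowMatch nm q.2) := by
  rw [List.map_append] at hnd hother
  by_cases hpre : pre.any (fun m => pvLowMatch nm m.2)
  · obtain ⟨m, hm, hmm⟩ := List.any_eq_true.mp hpre
    have hfs : (pre.find? (fun r => pvLowMatch nm r.2)).isSome := by
      rw [List.find?_isSome]; exact ⟨m, hm, hmm⟩
    obtain ⟨m', hm'⟩ := Option.isSome_iff_exists.mp hfs
    have hmem := List.mem_of_find?_eq_some hm'
    have hne : m'.1 ≠ q.1 := by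
      have hdisj := (List.nodup_append.mp hnd).2.2
      intro he
      exact hdisj m'.1 (List.mem_map_of_mem hmem) q.1 (List.mem_cons_self ..) he
    simp [pvKeyOf, List.find?_append, hm', hpre, hne]
  · have hn : pre.find? (fun r => pvLowMatch nm r.2) = none := by
      rw [List.find?_eq_none]
      intro x hx hmx
      exact hpre (List.any_eq_true.mpr ⟨x, hx, hmx⟩)
    rw [pvKeyOf, List.find?_append, hn, Option.none_or]
    simp only [Bool.not_eq_true] at hpre
    rw [hpre, Bool.not_false, Bool.true_and]
    by_cases hq : pvLowMatch nm q.2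
    · simp [hq]
    · simp only [Bool.not_eq_true] at hq
      simp only [List.find?_cons, hq]
      cases hr : rest'.find? (fun r => pvLowMatch nm r.2) with
      | none =>
          have : q.1 ≠ "other" := by
            intro he; exact hother (List.mem_append_right _ (by rw [← he]; exact List.mem_cons_self ..))
          simp only [Option.map_none, Option.getD_none, beq_eq_false_iff_ne, ne_eq]
          exact fun he => this he.symm
      | some m2 =>
          have hmem2 := List.mem_of_find?_eq_some hr
          have : m2.1 ≠ q.1 := by
            have := (List.nodup_cons.mp (List.nodup_append.mp hnd).2.1).1
            intro he; exact this (by rw [← he]; exact List.mem_map_of_mem hmem2)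
          simp [this]

theorem pvKeyOf_other (patterns : List (String × List String))
    (hother : "other" ∉ patterns.map Prod.fst) (nm : String) :
    (pvKeyOf patterns nm == "other") = !patterns.any (fun m => pvLowMatch nm m.2) := by
  cases h : patterns.find? (fun q => pvLowMatch nm q.2) with
  | none =>
      have : ¬ patterns.any (fun m => pvLowMatch nm m.2) = true := by
        rw [List.any_eq_true]
        rintro ⟨m, hm, hmm⟩
        exact absurd hmm (List.find?_eq_none.mp h m hm)
      simp [pvKeyOf, h, this]
  | some m =>
      have hmem := List.mem_of_find?_eq_some h
      have hmatch := List.find?_some h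
      have h1 : m.1 ≠ "other" := by
        intro he; exact hother (by rw [← he]; exact List.mem_map_of_mem hmem)
      have h2 : patterns.any (fun r => pvLowMatch nm r.2) = true :=
        List.any_eq_true.mpr ⟨m, hmem, hmatch⟩
      simp [pvKeyOf, h, h1, h2]

-- a Set.update by elements already present changes nothing
theorem pvSet_update_sub (K : PySem.Set String) (ks : List String) (h : ∀ x ∈ ks, x ∈ K) :
    PySem.Set.update K ks = K := by
  rw [PySem.Set.update_eq_append_filter]
  have hnil : (PySem.Set.ofList ks).filter (fun y => !PySem.Set.contains K y) = [] := by
    apply List.filter_eq_nil_iff.mpr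
    intro y hy
    have : y ∈ ks := (PySem.Set.mem_ofList ks y).1 hy
    simp [h y this]
  rw [hnil]; simp

-- every value of the initial groups dict is []
theorem pvInit_getD (patterns : List (String × List String)) :
    ∀ (d : PySem.Dict String (List Int)), (∀ c, d.getD c [] = []) →
    ∀ c, (patterns.foldl (fun d q => d.insert q.1 ([] : List Int)) d).getD c [] = [] := by
  induction patterns with
  | nil => intro d h c; exact h c
  | cons q t ih =>
      intro d h c
      simp only [List.foldl_cons]
      exact ih _ (fun c' => by rw [PySem.Dict.getD_insert]; split <;> simp [h]) c

-- fold of keyed modifies: getD reads off the appended indices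
theorem pvGetD_fold_modify (l : List (Int × String)) (key : String → String)
    (d : PySem.Dict String (List Int)) (c : String) :
    (l.foldl (fun d p => d.modify (key p.2) [] (· ++ [p.1])) d).getD c []
      = d.getD c [] ++ (l.filter (fun p => key p.2 == c)).map Prod.fst := by
  have h := PySem.Dict.getD_foldl_modify_append
    (l := l.map (fun p => (key p.2, p.1))) (d := d) (c := c)
  rw [List.foldl_map, List.filter_map, List.map_map] at h
  exact h

-- A's per-name loop returns the canonical grouped form (stated on the normalised key list)
theorem pvA_char (names : List String) (patterns : List (String × List String))
    (hnd : (patterns.map Prod.fst).Nodup) (hother : "other" ∉ patterns.map Prod.fst) :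
    (((PySem.List.enumerate names).foldl (fun d p => pvAssignOne p.1 p.2 patterns d)
        ((patterns.foldl (fun d q => d.insert q.1 ([] : List Int)) PySem.Dict.empty).insert
          "other" ([] : List Int))).items).filter (fun p => !p.2.isEmpty)
      = ((patterns.map (fun q => (q.1, pvIdxs names patterns q.1))
        ++ [("other", pvIdxs names patterns "other")]).filter (fun p => !p.2.isEmpty)) := by
  have hfun : (fun (d : PySem.Dict String (List Int)) (p : Int × String) => pvAssignOne p.1 p.2 patterns d)
      = fun d p => d.modify (pvKeyOf patterns p.2) [] (· ++ [p.1]) := by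
    funext d p; exact pvAssignOne_eq p.1 p.2 patterns d
  rw [hfun]
  have hkeys0 : (patterns.foldl (fun d q => d.insert q.1 ([] : List Int)) PySem.Dict.empty).keys
      = patterns.map Prod.fst := by
    rw [PySem.Dict.keys_foldl_insert_key (l := patterns) (key := Prod.fst)
      (f := fun _ _ => ([] : List Int)) (d := PySem.Dict.empty)]
    rw [PySem.Dict.keys_empty, PySem.Set.update_nil_left, PySem.Set.ofList_eq_self_of_nodup _ hnd]
  have hc0 : (patterns.foldl (fun d q => d.insert q.1 ([] : List Int)) PySem.Dict.empty).contains "other" = false := by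
    rw [← Bool.not_eq_true, PySem.Dict.contains_iff_mem_keys, hkeys0]
    exact hother
  have hkeys1 : ((patterns.foldl (fun d q => d.insert q.1 ([] : List Int)) PySem.Dict.empty).insert "other" ([] : List Int)).keys
      = patterns.map Prod.fst ++ ["other"] := by
    rw [PySem.Dict.keys_insert_of_not_contains _ _ hc0, hkeys0]
  have hnd1 : ((patterns.map Prod.fst) ++ ["other"]).Nodup := by
    rw [List.nodup_append]
    refine ⟨hnd, List.nodup_singleton _, ?_⟩
    intro a ha b hb
    rw [List.mem_singleton] at hb
    subst hb; intro he; exact hother (he ▸ ha)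
  have hkeys2 : ((PySem.List.enumerate names).foldl
        (fun d p => d.modify (pvKeyOf patterns p.2) [] (· ++ [p.1]))
        ((patterns.foldl (fun d q => d.insert q.1 ([] : List Int)) PySem.Dict.empty).insert "other" ([] : List Int))).keys
      = patterns.map Prod.fst ++ ["other"] := by
    rw [PySem.Dict.keys_foldl_modify_key (l := PySem.List.enumerate names)
      (key := fun p => pvKeyOf patterns p.2) (d0 := ([] : List Int)) (f := fun _ p v => v ++ [p.1])]
    rw [hkeys1]
    apply pvSet_update_sub
    intro x hx
    obtain ⟨p, hp, rfl⟩ := List.mem_map.mp hx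
    exact pvKeyOf_mem patterns p.2
  have hgetD : ∀ c, ((PySem.List.enumerate names).foldl
        (fun d p => d.modify (pvKeyOf patterns p.2) [] (· ++ [p.1]))
        ((patterns.foldl (fun d q => d.insert q.1 ([] : List Int)) PySem.Dict.empty).insert "other" ([] : List Int))).getD c []
      = pvIdxs names patterns c := by
    intro c
    rw [pvGetD_fold_modify (PySem.List.enumerate names) (pvKeyOf patterns) _ c]
    have hinit : ((patterns.foldl (fun d q => d.insert q.1 ([] : List Int)) PySem.Dict.empty).insert "other" ([] : List Int)).getD c [] = [] := by
      rw [PySem.Dict.getD_insert]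
      split
      · rfl
      · exact pvInit_getD patterns PySem.Dict.empty (fun c' => by simp [PySem.Dict.getD_empty]) c
    rw [hinit, List.nil_append]
    rfl
  rw [PySem.Dict.items_eq_map_keys _ (by rw [hkeys2]; exact hnd1) []]
  rw [hkeys2, List.map_append, List.map_map]
  congr 1
  congr 1
  · apply List.map_congr_left
    intro q hq
    simp only [Function.comp]
    rw [hgetD q.1]
  · simp only [List.map_cons, List.map_nil]
    rw [hgetD "other"]

-- B's loop body and B's invariant: the still-unclaimed (index, lowered name) pairs
def pvStep (st : List (Int × String) × PySem.Dict String (List Int)) (q : String × List String) :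
    List (Int × String) × PySem.Dict String (List Int) :=
  let subs := q.2.map PySem.Str.lower
  let taken := (st.1.filter (fun p => subs.any (fun s => PySem.Str.isIn s p.2))).map (·.1)
  if taken.isEmpty then st
  else (st.1.filter (fun p => !subs.any (fun s => PySem.Str.isIn s p.2)), st.2.insert q.1 taken)

def pvRem (names : List String) (ps : List (String × List String)) : List (Int × String) :=
  ((PySem.List.enumerate names).filter (fun p => !ps.any (fun m => pvLowMatch p.2 m.2))).map
    (fun p => (p.1, PySem.Str.lower p.2))

theorem pvRem_nil (names : List String) :
    pvRem names [] = PySem.List.enumerate (names.map PySem.Str.lower) := by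
  unfold pvRem
  rw [pvEnum_map PySem.Str.lower names 0]
  congr 1
  simp

-- one step of B over the pairs still unclaimed after `pre`: what it takes is the canonical
-- index list of the head group, and what it keeps is the pairs unclaimed after `pre ++ [q]`
theorem pvTaken_eq (names : List String) (patterns : List (String × List String))
    (hnd : (patterns.map Prod.fst).Nodup) (hother : "other" ∉ patterns.map Prod.fst)
    (pre rest' : List (String × List String)) (q : String × List String)
    (hsplit : patterns = pre ++ q :: rest') :
    ((pvRem names pre).filter
        (fun p => (q.2.map PySem.Str.lower).any (fun s => PySem.Str.isIn s p.2))).map (·.1)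
      = pvIdxs names patterns q.1 := by
  unfold pvRem pvIdxs
  rw [List.filter_map, List.map_map, List.filter_filter]
  have hmap : ((·.1) ∘ fun p : Int × String => (p.1, PySem.Str.lower p.2))
      = (Prod.fst : Int × String → Int) := rfl
  rw [hmap]
  congr 1
  apply List.filter_congr
  intro p hp
  simp only [Function.comp_apply, List.any_map]
  rw [hsplit] at hnd hother ⊢
  rw [pvKeyOf_eq_head pre rest' q hnd hother p.2]
  rw [Bool.and_comm]
  rfl

theorem pvKept_eq (names : List String) (pre : List (String × List String))
    (q : String × List String) :
    (pvRem names pre).filter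
        (fun p => !(q.2.map PySem.Str.lower).any (fun s => PySem.Str.isIn s p.2))
      = pvRem names (pre ++ [q]) := by
  unfold pvRem
  rw [List.filter_map, List.filter_filter]
  congr 1
  apply List.filter_congr
  intro p hp
  simp only [Function.comp_apply, List.any_map, List.any_append, List.any_cons, List.any_nil,
    Bool.or_false, Bool.not_or, Bool.and_comm]
  rfl

-- if B takes nothing for q, nothing in the remainder matches q, so `pre ++ [q]` keeps it all
theorem pvRem_stable (names : List String) (patterns : List (String × List String))
    (hnd : (patterns.map Prod.fst).Nodup) (hother : "other" ∉ patterns.map Prod.fst)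
    (pre rest' : List (String × List String)) (q : String × List String)
    (hsplit : patterns = pre ++ q :: rest')
    (hemp : (pvIdxs names patterns q.1).isEmpty) :
    pvRem names (pre ++ [q]) = pvRem names pre := by
  rw [← pvKept_eq]
  conv_rhs => rw [← List.filter_true (pvRem names pre)]
  apply List.filter_congr
  intro p hp
  have htk := pvTaken_eq names patterns hnd hother pre rest' q hsplit
  rw [List.isEmpty_iff] at hemp
  rw [hemp] at htk
  have : (pvRem names pre).filter
      (fun p => (q.2.map PySem.Str.lower).any (fun s => PySem.Str.isIn s p.2)) = [] := by
    have := congrArg List.isEmpty htk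
    rw [List.isEmpty_map] at this
    simpa using this
  have hx := List.filter_eq_nil_iff.mp this p hp
  simp only [Bool.not_eq_true] at hx
  rw [hx]
  rfl

-- B's fold over the groups: remaining pairs, result items and result keys together
theorem pvB_fold (names : List String) (patterns : List (String × List String))
    (hnd : (patterns.map Prod.fst).Nodup) (hother : "other" ∉ patterns.map Prod.fst) :
    ∀ (rest pre : List (String × List String)) (result : PySem.Dict String (List Int)),
    patterns = pre ++ rest →
    (∀ k, result.contains k = true → k ∈ pre.map Prod.fst) →
    ((rest.foldl pvStep (pvRem names pre, result)).2.items
        = result.items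
          ++ (rest.map (fun q => (q.1, pvIdxs names patterns q.1))).filter (fun p => !p.2.isEmpty))
    ∧ (rest.foldl pvStep (pvRem names pre, result)).1 = pvRem names patterns
    ∧ (∀ k, (rest.foldl pvStep (pvRem names pre, result)).2.contains k = true →
        k ∈ patterns.map Prod.fst) := by
  intro rest
  induction rest with
  | nil =>
      intro pre result hsplit hkeys
      rw [List.append_nil] at hsplit
      subst hsplit
      simpa using hkeys
  | cons q rest' ih =>
      intro pre result hsplit hkeys
      have htk := pvTaken_eq names patterns hnd hother pre rest' q hsplit
      have hsplit' : patterns = (pre ++ [q]) ++ rest' := by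
        rw [hsplit, List.append_assoc, List.singleton_append]
      have hstep : pvStep (pvRem names pre, result) q =
          if (pvIdxs names patterns q.1).isEmpty then (pvRem names pre, result)
          else (pvRem names (pre ++ [q]), result.insert q.1 (pvIdxs names patterns q.1)) := by
        simp only [pvStep]
        rw [htk, pvKept_eq]
      rw [List.foldl_cons, hstep]
      by_cases hemp : (pvIdxs names patterns q.1).isEmpty
      · rw [if_pos hemp]
        rw [← pvRem_stable names patterns hnd hother pre rest' q hsplit hemp]
        have hkeys' : ∀ k, result.contains k = true → k ∈ (pre ++ [q]).map Prod.fst := by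
          intro k hk
          rw [List.map_append]
          exact List.mem_append_left _ (hkeys k hk)
        obtain ⟨h1, h2, h3⟩ := ih (pre ++ [q]) result hsplit' hkeys'
        refine ⟨?_, h2, h3⟩
        rw [h1, List.map_cons, List.filter_cons]
        have : (!(pvIdxs names patterns q.1).isEmpty) = false := by rw [hemp]; rfl
        rw [this]
        simp
      · rw [if_neg hemp]
        have hfresh : result.contains q.1 = false := by
          rw [← Bool.not_eq_true]
          intro hc
          have hq1 : q.1 ∈ (q :: rest').map Prod.fst := List.mem_map_of_mem (List.mem_cons_self ..)
          have := (List.nodup_append.mp (by rw [hsplit, List.map_append] at hnd; exact hnd)).2.2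
          exact this q.1 (hkeys q.1 hc) q.1 hq1 rfl
        have hkeys' : ∀ k, (result.insert q.1 (pvIdxs names patterns q.1)).contains k = true →
            k ∈ (pre ++ [q]).map Prod.fst := by
          intro k hk
          rw [PySem.Dict.contains_insert] at hk
          rw [List.map_append]
          rcases Bool.or_eq_true_iff.mp hk with h | h
          · exact List.mem_append_right _ (by rw [List.map_cons]; exact (beq_iff_eq.mp h) ▸ List.mem_cons_self ..)
          · exact List.mem_append_left _ (hkeys k h)
        obtain ⟨h1, h2, h3⟩ := ih (pre ++ [q]) (result.insert q.1 (pvIdxs names patterns q.1))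
          hsplit' hkeys'
        refine ⟨?_, h2, h3⟩
        rw [h1, PySem.Dict.items_insert_of_not_contains _ _ hfresh]
        rw [List.map_cons, List.filter_cons]
        have : (!(pvIdxs names patterns q.1).isEmpty) = true := by
          rw [Bool.not_eq_true']
          exact Bool.of_not_eq_true hemp
        rw [this, List.append_assoc]
        simp

-- the indices left over at the end are exactly the canonical "other" bucket
theorem pvRem_other (names : List String) (patterns : List (String × List String))
    (hother : "other" ∉ patterns.map Prod.fst) :
    (pvRem names patterns).map (·.1) = pvIdxs names patterns "other" := by
  unfold pvRem pvIdxs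
  rw [List.map_map]
  have hmap : ((·.1) ∘ fun p : Int × String => (p.1, PySem.Str.lower p.2))
      = (Prod.fst : Int × String → Int) := rfl
  rw [hmap]
  congr 1
  apply List.filter_congr
  intro p hp
  rw [pvKeyOf_other patterns hother p.2]

-- the normalised key list of a Python dict argument: unique keys, and "other" stays absent
theorem pvPats_nodup (patterns : List (String × List String)) :
    (((PySem.Dict.ofList patterns).items).map Prod.fst).Nodup :=
  PySem.Dict.nodup_keys_ofList patterns

theorem pvPats_other (patterns : List (String × List String))
    (hother : "other" ∉ patterns.map Prod.fst) :
    "other" ∉ ((PySem.Dict.ofList patterns).items).map Prod.fst := by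
  have hkeys : (PySem.Dict.ofList patterns).keys = PySem.Set.ofList (patterns.map Prod.fst) := by
    rw [show PySem.Dict.ofList patterns
        = patterns.foldl (fun d p => d.insert p.1 p.2) PySem.Dict.empty from rfl]
    rw [PySem.Dict.keys_foldl_insert_key (l := patterns) (key := Prod.fst)
      (f := fun _ p => p.2) (d := PySem.Dict.empty)]
    rw [PySem.Dict.keys_empty, PySem.Set.update_nil_left]
  intro hm
  exact hother ((PySem.Set.mem_ofList _ _).1 (by rw [← hkeys]; exact hm))

-- ===== VERDICT (by name: the statement is the Claim_ definition above) =====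
theorem assign_groups_spec : Claim_equal_assign_groups := by
  intro names patterns hdom hpre
  unfold Spec_assign_groups
  unfold Pre_assign_groups at hpre
  have hnd := pvPats_nodup patterns
  have hother := pvPats_other patterns hpre
  simp only [assign_groups]
  rw [pvA_char names ((PySem.Dict.ofList patterns).items) hnd hother]
  have hB : assign_groups_alt names patterns =
      (if (((PySem.Dict.ofList patterns).items).foldl pvStep
            (pvRem names [], PySem.Dict.empty)).1.isEmpty
       then (((PySem.Dict.ofList patterns).items).foldl pvStep
            (pvRem names [], PySem.Dict.empty)).2
       else (((PySem.Dict.ofList patterns).items).foldl pvStep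
            (pvRem names [], PySem.Dict.empty)).2.insert "other"
              ((((PySem.Dict.ofList patterns).items).foldl pvStep
                (pvRem names [], PySem.Dict.empty)).1.map (·.1))).items := by
    rw [pvRem_nil names]
    rfl
  rw [hB]
  obtain ⟨hres, hrem, hcon⟩ := pvB_fold names ((PySem.Dict.ofList patterns).items) hnd hother
    ((PySem.Dict.ofList patterns).items) [] PySem.Dict.empty rfl
    (fun k hk => absurd hk (by simp [PySem.Dict.contains_empty]))
  rw [hrem] at *
  have hoc : (((PySem.Dict.ofList patterns).items).foldl pvStep
      (pvRem names [], PySem.Dict.empty)).2.contains "other" = false := by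
    rw [← Bool.not_eq_true]
    intro hc
    exact hother (hcon _ hc)
  have hemp : (pvRem names ((PySem.Dict.ofList patterns).items)).isEmpty
      = (pvIdxs names ((PySem.Dict.ofList patterns).items) "other").isEmpty := by
    rw [← pvRem_other names _ hother, List.isEmpty_map]
  have hresnil : (((PySem.Dict.ofList patterns).items).foldl pvStep
      (pvRem names [], PySem.Dict.empty)).2.items
      = (((PySem.Dict.ofList patterns).items).map
          (fun q => (q.1, pvIdxs names ((PySem.Dict.ofList patterns).items) q.1))).filter
          (fun p => !p.2.isEmpty) := by
    rw [hres]
    rfl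
  rw [List.filter_append]
  by_cases he : (pvIdxs names ((PySem.Dict.ofList patterns).items) "other").isEmpty
  · rw [hemp, he, if_pos rfl, hresnil]
    have hdrop : List.filter (fun p => !p.2.isEmpty)
        [("other", pvIdxs names ((PySem.Dict.ofList patterns).items) "other")] = [] := by
      simp [he]
    rw [hdrop, List.append_nil]
  · rw [hemp, if_neg (by rw [Bool.of_not_eq_true he]; simp)]
    rw [PySem.Dict.items_insert_of_not_contains _ _ hoc, hresnil]
    rw [pvRem_other names _ hother]
    have hkeep : List.filter (fun p => !p.2.isEmpty)
        [("other", pvIdxs names ((PySem.Dict.ofList patterns).items) "other")]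
        = [("other", pvIdxs names ((PySem.Dict.ofList patterns).items) "other")] := by
      simp [Bool.of_not_eq_true he]
    rw [hkeep]
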